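-- pv_equiv track=rewrite | github.com/devin-fisher/treadstone | lib/timeline_analysis/events.py | start_counter_list_function
-- ===== SOURCE A (Python) =====
-- def start_counter_list_function(kill_list, counter_list):
--     start_list = []
--
--     kill_counter = 0
--     kill_length = len(kill_list)
--     start_list.append(kill_list[0])
--     for a in range(1,kill_length):
--         current = kill_list[a]
--         last = a - 1
--         before = kill_list[last]
--         delta = current - before
--         if delta > 15000:
--             cur = kill_list[a]
--             start_list.append(cur)
--             counter_list.append(kill_counter)
--             kill_counter  = 0
--         else:
--             kill_counter = kill_counter + 1
--     counter_list.append(kill_counter)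
--
--     return start_list, counter_list
-- ===== SOURCE B (Python) =====
-- def start_counter_list_function(kill_list, counter_list):
--     # Two-pass: first group kill times into gap-separated segments,
--     # then read off segment starts and per-segment counts.
--     # Mutates counter_list in place (extend), like the original.
--     segments = [[kill_list[0]]]
--     for prev, cur in zip(kill_list, kill_list[1:]):
--         if cur - prev > 15000:
--             segments.append([cur])
--         else:
--             segments[-1].append(cur)
--     start_list = [seg[0] for seg in segments]
--     counter_list.extend(len(seg) - 1 for seg in segments)
--     return start_list, counter_list
-- ===== Notes on version B (the rewrite author's own statement) =====
-- stated objective: alternative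
-- what changed: Replaces the single index-driven counter loop with a two-pass decomposition: build gap-separated segments by scanning consecutive pairs, then derive start_list as segment heads and the counter increments as segment lengths minus one.
import Mathlib
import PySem

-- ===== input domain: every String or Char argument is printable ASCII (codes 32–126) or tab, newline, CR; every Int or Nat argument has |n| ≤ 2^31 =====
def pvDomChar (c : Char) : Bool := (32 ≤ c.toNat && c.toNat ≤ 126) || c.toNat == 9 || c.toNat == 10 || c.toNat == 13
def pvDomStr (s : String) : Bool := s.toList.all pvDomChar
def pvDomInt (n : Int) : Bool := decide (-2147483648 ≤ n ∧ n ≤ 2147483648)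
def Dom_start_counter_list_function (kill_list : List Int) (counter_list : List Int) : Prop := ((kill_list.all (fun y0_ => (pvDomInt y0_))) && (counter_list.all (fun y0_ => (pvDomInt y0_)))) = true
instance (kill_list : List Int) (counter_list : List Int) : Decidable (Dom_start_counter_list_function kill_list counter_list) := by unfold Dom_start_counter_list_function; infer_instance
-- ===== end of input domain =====

-- B changes the decomposition (segments first, then starts/counts) but returns the same value;
-- both A and B mutate the Python counter_list in place, and the equivalence is about the return value.

-- ===== PORT A =====
def start_counter_list_function (kill_list : List Int) (counter_list : List Int) : List Int × List Int :=
  let start_list : List Int := [PySem.List.pyGetD kill_list 0 0]   -- kill_list[0]; in range under Pre_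
  let st := (PySem.List.pyRange 1 (kill_list.length : Int) 1).foldl
    (fun (st : List Int × List Int × Int) a =>
      let current := PySem.List.pyGetD kill_list a 0
      let last := a - 1
      let before := PySem.List.pyGetD kill_list last 0
      let delta := current - before
      if delta > 15000 then (st.1 ++ [current], st.2.1 ++ [st.2.2], 0)
      else (st.1, st.2.1, st.2.2 + 1))
    (start_list, counter_list, (0 : Int))
  (st.1, st.2.1 ++ [st.2.2])

-- ===== PORT B =====
-- seg[0] (segments are built nonempty)
def pvSegFirst (seg : List Int) : Int := (PySem.List.pyGet? seg 0).getD 0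

-- segments[-1].append(x)
def pvAppendLast : List (List Int) → Int → List (List Int)
  | [], x => [[x]]
  | [s], x => [s ++ [x]]
  | s :: t :: rest, x => s :: pvAppendLast (t :: rest) x

def start_counter_list_function_alt (kill_list : List Int) (counter_list : List Int) : List Int × List Int :=
  let segments := (kill_list.zip (PySem.List.slice kill_list (some 1) none)).foldl
    (fun segs pc => if pc.2 - pc.1 > 15000 then segs ++ [[pc.2]] else pvAppendLast segs pc.2)
    [[PySem.List.pyGetD kill_list 0 0]]   -- kill_list[0]; in range under Pre_
  (segments.map pvSegFirst,
   counter_list ++ segments.map (fun seg => (seg.length : Int) - 1))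

-- ===== PRECONDITION & SPEC =====
-- Pre_ excludes only the empty kill_list, on which both Pythons raise IndexError (kill_list[0]).
def Pre_start_counter_list_function (kill_list : List Int) (counter_list : List Int) : Prop := kill_list ≠ []
instance (kill_list : List Int) (counter_list : List Int) : Decidable (Pre_start_counter_list_function kill_list counter_list) := by unfold Pre_start_counter_list_function; infer_instance
def pvWitness_start_counter_list_function : List Int × List Int := ([1000, 2000, 20000], [7])

def Spec_start_counter_list_function (kill_list : List Int) (counter_list : List Int) (out : List Int × List Int) : Prop := out = start_counter_list_function_alt kill_list counter_list
instance (kill_list : List Int) (counter_list : List Int) (out : List Int × List Int) : Decidable (Spec_start_counter_list_function kill_list counter_list out) := by unfold Spec_start_counter_list_function; infer_instance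

-- ===== CLAIM (what is proved, stated in full; the proofs are below) =====
def Claim_equal_start_counter_list_function : Prop := ∀ (kill_list : List Int) (counter_list : List Int), Dom_start_counter_list_function kill_list counter_list → Pre_start_counter_list_function kill_list counter_list → Spec_start_counter_list_function kill_list counter_list (start_counter_list_function kill_list counter_list)

-- ===== LEMMAS AND PROOFS =====

-- Shared reference recursion: A's loop state (start_list, counter_list, kill_counter), driven by the
-- previous element and the remaining suffix instead of indices.
def pvRun : Int → List Int → List Int × List Int × Int → List Int × List Int × Int
  | _, [], st => st
  | prev, x :: xs, st =>
      pvRun x xs (if x - prev > 15000 then (st.1 ++ [x], st.2.1 ++ [st.2.2], 0)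
                  else (st.1, st.2.1, st.2.2 + 1))

-- consecutive pairs, as produced by zip l l[1:]
def pvPairs : Int → List Int → List (Int × Int)
  | _, [] => []
  | prev, x :: xs => (prev, x) :: pvPairs x xs

lemma pvZip_eq_pairs : ∀ (t : List Int) (h : Int), (h :: t).zip t = pvPairs h t := by
  intro t
  induction t with
  | nil => intro h; rfl
  | cons x xs ih => intro h; simp [List.zip, pvPairs]; exact ih x

lemma pvSegFirst_cons (y : Int) (ys : List Int) : pvSegFirst (y :: ys) = y := by
  simp [pvSegFirst, PySem.List.pyGet?, PySem.List.pyIdx?]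

lemma pvGetD_append_len (pre : List Int) (y : Int) (rest : List Int) (d : Int) :
    (pre ++ y :: rest).getD pre.length d = y := by
  simp [List.getD]

lemma pvAppendLast_append : ∀ (init : List (List Int)) (last : List Int) (x : Int),
    pvAppendLast (init ++ [last]) x = init ++ [last ++ [x]] := by
  intro init
  induction init with
  | nil => intro last x; rfl
  | cons s init ih =>
    intro last x
    cases init with
    | nil => rfl
    | cons t init' => simpa [pvAppendLast] using ih last x

lemma pvSegFirst_append (s : List Int) (hs : s ≠ []) (x : Int) :
    pvSegFirst (s ++ [x]) = pvSegFirst s := by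
  cases s with
  | nil => exact absurd rfl hs
  | cons y ys => rw [List.cons_append, pvSegFirst_cons, pvSegFirst_cons]

-- A's index loop over pyRange equals the structural recursion pvRun.
lemma pvFoldA_eq_run (l : List Int) :
    ∀ (rest pre : List Int) (prev : Int) (st : List Int × List Int × Int),
    l = pre ++ prev :: rest →
    (PySem.List.pyRange ((pre.length : Int) + 1) (l.length : Int) 1).foldl
      (fun (st : List Int × List Int × Int) a =>
        let current := PySem.List.pyGetD l a 0
        let last := a - 1
        let before := PySem.List.pyGetD l last 0
        let delta := current - before
        if delta > 15000 then (st.1 ++ [current], st.2.1 ++ [st.2.2], 0)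
        else (st.1, st.2.1, st.2.2 + 1)) st
    = pvRun prev rest st := by
  intro rest
  induction rest with
  | nil =>
    intro pre prev st hl
    have hlen : (l.length : Int) = (pre.length : Int) + 1 := by subst hl; simp
    rw [hlen, PySem.List.pyRange_one_eq_nil (le_refl _)]
    rfl
  | cons x xs ih =>
    intro pre prev st hl
    have hlt : (pre.length : Int) + 1 < (l.length : Int) := by
      subst hl
      simp only [List.length_append, List.length_cons]
      push_cast
      omega
    rw [PySem.List.pyRange_one_cons hlt, List.foldl_cons]
    have hcur : PySem.List.pyGetD l ((pre.length : Int) + 1) 0 = x := by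
      rw [show ((pre.length : Int) + 1) = ((pre.length + 1 : Nat) : Int) by push_cast; ring,
          PySem.List.pyGetD_natCast]
      subst hl
      rw [show pre ++ prev :: x :: xs = (pre ++ [prev]) ++ x :: xs by simp,
          show pre.length + 1 = (pre ++ [prev]).length by simp]
      exact pvGetD_append_len (pre ++ [prev]) x xs 0
    have hbef : PySem.List.pyGetD l ((pre.length : Int) + 1 - 1) 0 = prev := by
      rw [show ((pre.length : Int) + 1 - 1) = ((pre.length : Nat) : Int) by ring,
          PySem.List.pyGetD_natCast]
      subst hl
      exact pvGetD_append_len pre prev (x :: xs) 0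
    show (PySem.List.pyRange ((pre.length : Int) + 1 + 1) (l.length : Int) 1).foldl _
        (if PySem.List.pyGetD l ((pre.length : Int) + 1) 0
            - PySem.List.pyGetD l ((pre.length : Int) + 1 - 1) 0 > 15000
         then (st.1 ++ [PySem.List.pyGetD l ((pre.length : Int) + 1) 0], st.2.1 ++ [st.2.2], 0)
         else (st.1, st.2.1, st.2.2 + 1)) = _
    rw [hcur, hbef]
    rw [show ((pre.length : Int) + 1 + 1) = (((pre ++ [prev]).length : Nat) : Int) + 1 by
          simp only [List.length_append, List.length_cons, List.length_nil]
          push_cast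
          ring]
    rw [ih (pre ++ [prev]) x _ (by simp [hl])]
    rfl

-- pvRun (plus the final counter append) computes exactly B's segments read-out.
lemma pvRun_fin (cl0 : List Int) :
    ∀ (rest : List Int) (prev : Int) (init : List (List Int)) (last : List Int), last ≠ [] →
    (let r := pvRun prev rest ((init ++ [last]).map pvSegFirst,
                cl0 ++ init.map (fun s => (s.length : Int) - 1), ((last.length : Int) - 1));
     (r.1, r.2.1 ++ [r.2.2]))
    = (let segs := (pvPairs prev rest).foldl
        (fun segs pc => if pc.2 - pc.1 > 15000 then segs ++ [[pc.2]] else pvAppendLast segs pc.2)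
        (init ++ [last]);
       (segs.map pvSegFirst, cl0 ++ segs.map (fun s => (s.length : Int) - 1))) := by
  intro rest
  induction rest with
  | nil =>
    intro prev init last hlast
    simp [pvRun, pvPairs]
  | cons x xs ih =>
    intro prev init last hlast
    rw [show pvPairs prev (x :: xs) = (prev, x) :: pvPairs x xs from rfl, List.foldl_cons]
    simp only [pvRun]
    by_cases hgap : x - prev > 15000
    · rw [if_pos hgap, if_pos hgap]
      have h1 : ((init ++ [last]).map pvSegFirst ++ [x],
                 (cl0 ++ init.map (fun s => (s.length : Int) - 1)) ++ [(last.length : Int) - 1],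
                 (0 : Int))
          = (((init ++ [last]) ++ [[x]]).map pvSegFirst,
             cl0 ++ ((init ++ [last]).map (fun s => (s.length : Int) - 1)),
             ((([x] : List Int).length : Int) - 1)) := by
        simp [pvSegFirst_cons]
      rw [h1]
      exact ih x (init ++ [last]) [x] (by simp)
    · rw [if_neg hgap, if_neg hgap, pvAppendLast_append]
      have h1 : ((init ++ [last]).map pvSegFirst,
                 cl0 ++ init.map (fun s => (s.length : Int) - 1),
                 ((last.length : Int) - 1) + 1)
          = ((init ++ [last ++ [x]]).map pvSegFirst,
             cl0 ++ init.map (fun s => (s.length : Int) - 1),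
             (((last ++ [x]).length : Int) - 1)) := by
        rw [List.map_append, List.map_append, List.map_singleton, List.map_singleton,
            pvSegFirst_append last hlast]
        simp only [List.length_append, List.length_cons, List.length_nil]
        push_cast
        ring_nf
      rw [h1]
      exact ih x init (last ++ [x]) (by simp)

-- ===== VERDICT (by name: the statement is the Claim_ definition above) =====
theorem start_counter_list_function_spec : Claim_equal_start_counter_list_function := by
  intro kill_list counter_list _ hpre
  unfold Pre_start_counter_list_function at hpre
  obtain ⟨h, t, rfl⟩ : ∃ h t, kill_list = h :: t := by
    cases kill_list with
    | nil => exact absurd rfl hpre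
    | cons h t => exact ⟨h, t, rfl⟩
  show start_counter_list_function (h :: t) counter_list
      = start_counter_list_function_alt (h :: t) counter_list
  have hA := pvFoldA_eq_run (h :: t) t [] h ([h], counter_list, (0 : Int)) (by simp)
  simp only [List.length_nil, Nat.cast_zero, zero_add] at hA
  have hB := pvRun_fin counter_list t h [] [h] (by simp)
  simp only [List.nil_append, List.map_nil, List.append_nil, List.map_cons, pvSegFirst_cons,
    List.length_cons, List.length_nil] at hB
  norm_num at hB
  simp only [start_counter_list_function, start_counter_list_function_alt,
    PySem.List.pyGetD_zero_cons]
  rw [PySem.List.slice_from_one, List.tail_cons, pvZip_eq_pairs, hA]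
  exact Prod.ext_iff.mpr hB
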